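-- pv_equiv track=rewrite | github.com/jhuston5/math-series | math_series/series.py | lucas_function
-- ===== SOURCE A (Python) =====
-- def lucas_function(n):
--   if n == 0:
--     return 0
--   if n == 1:
--     return 2
--   if n == 2:
--     return 1
--   else:
--     return lucas_function(n-1) + lucas_function(n-2)
-- ===== SOURCE B (Python) =====
-- def lucas_function(n):
--   if n == 0:
--     return 0
--   def step(a, b, k):
--     if k == 0:
--       return a
--     return step(b, a + b, k - 1)
--   return step(2, 1, n - 1)
-- ===== Notes on version B (the rewrite author's own statement) =====
-- stated objective: faster
-- what changed: Replaced the exponential two-branch recursion by a linear tail recursion carrying two accumulators bottom-up.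
import Mathlib
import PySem

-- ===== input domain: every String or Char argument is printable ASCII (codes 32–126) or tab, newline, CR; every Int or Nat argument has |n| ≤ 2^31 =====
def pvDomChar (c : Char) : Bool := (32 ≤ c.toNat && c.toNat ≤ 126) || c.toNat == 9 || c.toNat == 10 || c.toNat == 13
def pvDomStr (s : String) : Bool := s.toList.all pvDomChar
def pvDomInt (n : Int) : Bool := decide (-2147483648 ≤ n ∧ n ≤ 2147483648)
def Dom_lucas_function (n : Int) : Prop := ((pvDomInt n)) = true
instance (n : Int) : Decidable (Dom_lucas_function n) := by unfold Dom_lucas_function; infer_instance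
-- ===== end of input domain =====

-- B replaces A's exponential double recursion by a linear tail recursion with two accumulators (objective: faster).

-- ===== PORT A =====
-- A's recursion, written on the natural-number depth (faithful for n ≥ 0, which Pre_ requires;
-- for n < 0 the Python recursion never reaches a base case, so those inputs are outside Pre_).
def lucasA : Nat → Int
  | 0 => 0
  | 1 => 2
  | 2 => 1
  | n+3 => lucasA (n+2) + lucasA (n+1)

def lucas_function (n : Int) : Int := lucasA n.toNat

-- ===== PORT B =====
-- B's helper 'step'; its countdown k is a Nat (faithful for n ≥ 0, which Pre_ requires;
-- for n < 0 the Python tail recursion never reaches k == 0, so those inputs are outside Pre_).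
def lucasStep (a b : Int) : Nat → Int
  | 0 => a
  | k+1 => lucasStep b (a + b) k

def lucas_function_alt (n : Int) : Int :=
  if n == 0 then 0 else lucasStep 2 1 (n - 1).toNat

-- ===== PRECONDITION & SPEC =====
-- Pre_ excludes n < 0, where Python A recurses without reaching a base case (RecursionError).
def Pre_lucas_function (n : Int) : Prop := 0 ≤ n
instance (n : Int) : Decidable (Pre_lucas_function n) := by unfold Pre_lucas_function; infer_instance
def pvWitness_lucas_function : Int := 5

def Spec_lucas_function (n : Int) (out : Int) : Prop := out = lucas_function_alt n
instance (n : Int) (out : Int) : Decidable (Spec_lucas_function n out) := by unfold Spec_lucas_function; infer_instance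

-- ===== CLAIM (what is proved, stated in full; the proofs are below) =====
def Claim_equal_lucas_function : Prop := ∀ (n : Int), Dom_lucas_function n → Pre_lucas_function n → Spec_lucas_function n (lucas_function n)

-- ===== LEMMAS AND PROOFS =====

-- B's tail recursion, started at a pair of consecutive lucasA values, lands k steps further along the sequence.
lemma lucasStep_shift : ∀ (k m : Nat),
    lucasStep (lucasA (m+1)) (lucasA (m+2)) k = lucasA (k + m + 1) := by
  intro k
  induction k with
  | zero => intro m; simp [lucasStep]
  | succ k ih =>
    intro m
    have h3 : lucasA (m+1) + lucasA (m+2) = lucasA (m+3) := by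
      simp [lucasA]; ring
    have : lucasA (m+2) = lucasA ((m+1)+1) := by norm_num
    rw [lucasStep, h3, this, show m+3 = (m+1)+2 from rfl, ih (m+1)]
    congr 1
    omega

-- ===== VERDICT (by name: the statement is the Claim_ definition above) =====
theorem lucas_function_spec : Claim_equal_lucas_function := by
  intro n _ hpre
  unfold Pre_lucas_function at hpre
  unfold Spec_lucas_function lucas_function lucas_function_alt
  by_cases h0 : n = 0
  · simp [h0, lucasA]
  · have key := lucasStep_shift (n-1).toNat 0
    have e1 : lucasA (0+1) = 2 := rfl
    have e2 : lucasA (0+2) = 1 := rfl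
    rw [e1, e2] at key
    rw [if_neg (by simp [h0]), key]
    congr 1
    omega
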